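-- pv_equiv track=rewrite | github.com/Daerdemandt/PredictionCalibrationApp | calibration_backend/integration_tests.py | exactly_one
-- ===== SOURCE A (Python) =====
-- from typing import List, Iterable
--
-- def exactly_one(iterable: Iterable):
--     result = False
--     for value in iterable:
--         if not result:
--             result |= bool(value)
--         else:
--             return False
--     return result
-- ===== SOURCE B (Python) =====
-- def exactly_one(iterable):
--     return sum(map(bool, iterable)) == 1
-- ===== Notes on version B (the rewrite author's own statement) =====
-- stated objective: idiomatic
-- what changed: Replaces A's flag/early-return state machine with the standard one-liner that counts truthy elements and compares the count to 1.
-- intended difference: On lists with exactly one truthy element whose last element is falsy (e.g. [1,0]) A returns False, because its loop bails out on any element after the first truthy one; B returns True, the intended 'exactly one truthy element'. — e.g. on exactly_one([1, 0]): A returns false, B returns true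
import Mathlib
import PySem

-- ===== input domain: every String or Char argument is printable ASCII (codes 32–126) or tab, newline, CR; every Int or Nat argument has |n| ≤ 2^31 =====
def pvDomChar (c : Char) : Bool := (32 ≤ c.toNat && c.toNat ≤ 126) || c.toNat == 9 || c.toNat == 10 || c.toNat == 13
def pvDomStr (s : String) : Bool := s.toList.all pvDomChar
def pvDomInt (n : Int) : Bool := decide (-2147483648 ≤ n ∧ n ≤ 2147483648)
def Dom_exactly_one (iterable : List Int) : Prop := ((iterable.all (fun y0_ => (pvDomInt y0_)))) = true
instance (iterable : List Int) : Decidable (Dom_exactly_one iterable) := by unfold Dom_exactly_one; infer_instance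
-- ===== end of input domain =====

-- B counts the truthy elements and compares to 1 (idiomatic); A's loop instead rejects any list
-- with an element after the first truthy one, which is wrong when those later elements are falsy (D_ below).
-- ===== PORT A =====
def exactly_one_go (iterable : List Int) (result : Bool) : Bool :=
  match iterable with
  | [] => result
  | value :: rest =>
    if !result then exactly_one_go rest (result || decide (value ≠ 0))
    else false

def exactly_one (iterable : List Int) : Bool := exactly_one_go iterable false

-- ===== PORT B =====
-- sum(map(bool, iterable)) == 1
def exactly_one_alt (iterable : List Int) : Bool :=
  decide ((iterable.map (fun v => if v ≠ 0 then (1 : Int) else 0)).sum = 1)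

-- ===== PRECONDITION & SPEC =====
-- On lists with exactly one truthy element whose last element is falsy, A returns False (its loop
-- bails out on any element after the first truthy one); B returns True, the intended 'exactly one truthy'.
def D_exactly_one (iterable : List Int) : Prop :=
  iterable.countP (fun v => decide (v ≠ 0)) = 1 ∧ iterable.getLast? = some 0
instance (iterable : List Int) : Decidable (D_exactly_one iterable) := by unfold D_exactly_one; infer_instance

def Spec_exactly_one (iterable : List Int) (out : Bool) : Prop :=
  ¬ D_exactly_one iterable → out = exactly_one_alt iterable
instance (iterable : List Int) (out : Bool) : Decidable (Spec_exactly_one iterable out) := by unfold Spec_exactly_one; infer_instance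

def pvDiffWitness_exactly_one : List Int := [1, 0]
def pvDiffWitnessOut_exactly_one : Bool × Bool := (false, true)

-- ===== CLAIM (what is proved, stated in full; the proofs are below) =====
def Claim_unchanged_exactly_one : Prop := ∀ (iterable : List Int), Dom_exactly_one iterable → Spec_exactly_one iterable (exactly_one iterable)
def Claim_changed_exactly_one : Prop := Dom_exactly_one (pvDiffWitness_exactly_one) ∧ D_exactly_one (pvDiffWitness_exactly_one) ∧ exactly_one (pvDiffWitness_exactly_one) = pvDiffWitnessOut_exactly_one.1 ∧ exactly_one_alt (pvDiffWitness_exactly_one) = pvDiffWitnessOut_exactly_one.2 ∧ pvDiffWitnessOut_exactly_one.1 ≠ pvDiffWitnessOut_exactly_one.2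
def Claim_exact_exactly_one : Prop := ∀ (iterable : List Int), Dom_exactly_one iterable → D_exactly_one iterable → exactly_one iterable ≠ exactly_one_alt iterable

-- ===== LEMMAS AND PROOFS =====

-- A's loop, started with flag false, accepts exactly the nonempty lists whose last element
-- is truthy and whose earlier elements are all falsy.
def lastForm (iterable : List Int) : Bool :=
  match iterable.getLast? with
  | none => false
  | some v => decide (v ≠ 0) && !(iterable.dropLast.any (fun x => decide (x ≠ 0)))

theorem go_false_eq_lastForm (l : List Int) : exactly_one_go l false = lastForm l := by
  induction l with
  | nil => simp [exactly_one_go, lastForm]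
  | cons v rest ih =>
    by_cases hv : v = 0
    · subst hv
      cases rest with
      | nil => simp [exactly_one_go, lastForm]
      | cons w t =>
        simp only [exactly_one_go, lastForm] at *
        simp [List.getLast?_cons_cons, List.dropLast_cons_of_ne_nil] at *
        tauto
    · cases rest with
      | nil => simp [exactly_one_go, lastForm, hv]
      | cons w t =>
        have h1 : exactly_one_go (v :: w :: t) false = false := by
          simp [exactly_one_go, hv]
        have h2 : lastForm (v :: w :: t) = false := by
          rcases hL : (w :: t).getLast? with _ | x
          · simp [List.getLast?_eq_none_iff] at hL
          · simp [lastForm, List.getLast?_cons_cons, hL,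
              List.dropLast_cons_of_ne_nil, hv]
        rw [h1, h2]

-- B's sum of indicator values is the count of nonzero elements.
theorem alt_eq_countP (l : List Int) :
    exactly_one_alt l = decide (l.countP (fun v => decide (v ≠ 0)) = 1) := by
  have h : (l.map (fun v => if v ≠ 0 then (1 : Int) else 0)).sum
      = (l.countP (fun v => decide (v ≠ 0)) : Int) := by
    induction l with
    | nil => simp
    | cons v rest ih =>
      rw [List.map_cons, List.sum_cons, List.countP_cons, ih]
      by_cases hv : v = 0
      · simp [hv]
      · simp only [ne_eq, hv, not_false_eq_true, if_true, decide_true]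
        push_cast
        ring
  rw [exactly_one_alt, h]
  apply decide_eq_decide.mpr
  exact_mod_cast Iff.rfl

theorem countP_concat_last (l : List Int) (h : l ≠ []) :
    l.countP (fun v => decide (v ≠ 0))
      = l.dropLast.countP (fun v => decide (v ≠ 0))
        + (if l.getLast h ≠ 0 then 1 else 0) := by
  conv_lhs => rw [← List.dropLast_concat_getLast h]
  by_cases hv : l.getLast h = 0 <;> simp [List.countP_append, hv]

theorem lastForm_eq (l : List Int) (v : Int) (h : l.getLast? = some v) :
    lastForm l = (decide (v ≠ 0) && !(l.dropLast.any fun x => decide (x ≠ 0))) := by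
  rw [lastForm, h]

theorem exactly_one_spec : Claim_unchanged_exactly_one := by
  intro l _ hnd
  rw [exactly_one, go_false_eq_lastForm, alt_eq_countP]
  rcases hne : l.getLast? with _ | v
  · have : l = [] := List.getLast?_eq_none_iff.mp hne
    subst this
    decide
  · rw [lastForm_eq l v hne]
    have hl : l ≠ [] := by rintro rfl; simp at hne
    by_cases hv : v = 0
    · subst hv
      have hD : List.countP (fun v => decide (v ≠ 0)) l ≠ 1 := fun hc => hnd ⟨hc, hne⟩
      rw [show decide ((0 : Int) ≠ 0) = false from rfl, Bool.false_and, decide_eq_false hD]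
    · have hg' : l.getLast hl = v := by
        have hx := List.getLast?_eq_some_getLast (l := l) hl
        have hne2 := hne
        rw [hx] at hne2
        exact Option.some.inj hne2
      have hcnt := countP_concat_last l hl
      rw [hg', if_pos hv] at hcnt
      cases hA : l.dropLast.any (fun x => decide (x ≠ 0)) with
      | false =>
        have hz : List.countP (fun v => decide (v ≠ 0)) l.dropLast = 0 := by
          rw [List.countP_eq_zero]
          intro a ha
          exact List.any_eq_false.mp hA a ha
        have hc1 : List.countP (fun v => decide (v ≠ 0)) l = 1 := by omega
        rw [decide_eq_true hc1, decide_eq_true hv]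
        rfl
      | true =>
        obtain ⟨x, hx, hx0⟩ := List.any_eq_true.mp hA
        have h1 : List.countP (fun v => decide (v ≠ 0)) l.dropLast ≠ 0 :=
          fun h => absurd hx0 (by simpa using List.countP_eq_zero.mp h x hx)
        have hc1 : List.countP (fun v => decide (v ≠ 0)) l ≠ 1 := by omega
        rw [decide_eq_false hc1, Bool.not_true, Bool.and_false]

theorem exactly_one_changed : Claim_changed_exactly_one := by
  unfold Claim_changed_exactly_one; decide

theorem exactly_one_tight : Claim_exact_exactly_one := by
  intro l _ hd
  rcases hd with ⟨hc, hlast⟩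
  rw [exactly_one, go_false_eq_lastForm, alt_eq_countP, lastForm_eq l 0 hlast,
    show decide ((0 : Int) ≠ 0) = false from rfl, Bool.false_and, decide_eq_true hc]
  exact Bool.false_ne_true
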